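-- pv_equiv track=rewrite | github.com/WooyoungSon/burdockcli | session_key.py | suitable_secret_from_key
-- ===== SOURCE A (Python) =====
-- def suitable_secret_from_key(key_decimal, p):
--     max_secret = 0
--     length = len(str(key_decimal))
--
--     for i in range(length):
--         current_secret = key_decimal % (10 ** (i + 1))
--         if current_secret < (p - 1) and current_secret > max_secret:
--             max_secret = current_secret
--     return max_secret
-- ===== SOURCE B (Python) =====
-- def suitable_secret_from_key(key_decimal, p):
--     # Binary search: s(i) = key_decimal % 10**(i+1) is non-decreasing in i,
--     # so "s(i) < p-1" holds on a prefix of i; take the largest qualifying suffix.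
--     length = len(str(key_decimal))
--     limit = p - 1
--     if key_decimal % 10 >= limit:
--         return 0
--     lo, hi = 0, length - 1
--     while lo < hi:
--         mid = (lo + hi + 1) // 2
--         if key_decimal % (10 ** (mid + 1)) < limit:
--             lo = mid
--         else:
--             hi = mid - 1
--     return key_decimal % (10 ** (lo + 1))
-- ===== Notes on version B (the rewrite author's own statement) =====
-- stated objective: alternative
-- what changed: A scans every digit-suffix s(i)=key%10^(i+1) linearly keeping a running max; B exploits that s(i) is non-decreasing in i, so it binary-searches for the largest i with s(i) < p-1 (returning 0 when even s(0) fails), O(log d) modulo operations over the d digit positions instead of d.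
import Mathlib
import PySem

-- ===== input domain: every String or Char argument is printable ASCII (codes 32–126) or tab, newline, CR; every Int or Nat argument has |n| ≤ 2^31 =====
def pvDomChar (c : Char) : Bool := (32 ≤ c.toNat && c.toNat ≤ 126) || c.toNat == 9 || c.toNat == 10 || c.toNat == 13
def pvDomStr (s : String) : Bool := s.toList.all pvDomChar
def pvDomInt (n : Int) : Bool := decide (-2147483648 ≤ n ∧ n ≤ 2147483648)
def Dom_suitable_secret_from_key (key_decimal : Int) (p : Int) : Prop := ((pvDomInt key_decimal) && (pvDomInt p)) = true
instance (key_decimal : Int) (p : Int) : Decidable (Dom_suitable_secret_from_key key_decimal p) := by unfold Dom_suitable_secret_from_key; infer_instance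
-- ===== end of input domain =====

-- B replaces A's linear scan over all digit-suffixes by a binary search over the
-- non-decreasing sequence s(i) = key_decimal % 10^(i+1)  (objective: alternative).

-- ===== PORT A =====
def suitable_secret_from_key (key_decimal : Int) (p : Int) : Int :=
  let length := PySem.Str.len (PySem.Int.toStr key_decimal)
  (PySem.List.pyRange 0 length 1).foldl
    (fun max_secret i =>
      let current_secret := PySem.Int.mod key_decimal (10 ^ (i + 1).toNat)
      if current_secret < p - 1 ∧ current_secret > max_secret then current_secret
      else max_secret) 0

-- ===== PORT B =====
-- the while-loop of Source B: shrink [lo, hi] keeping s(lo) < limit ≤ s(j) for j > hi;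
-- fuel = initial (hi - lo).toNat bounds the iteration count (the gap shrinks each turn)
def pvBsearch (key_decimal : Int) (limit : Int) : Nat → Int → Int → Int
  | fuel + 1, lo, hi =>
    if lo < hi then
      let mid := PySem.Int.floordiv (lo + hi + 1) 2
      if PySem.Int.mod key_decimal (10 ^ (mid + 1).toNat) < limit then
        pvBsearch key_decimal limit fuel mid hi
      else
        pvBsearch key_decimal limit fuel lo (mid - 1)
    else lo
  | 0, lo, _ => lo

def suitable_secret_from_key_alt (key_decimal : Int) (p : Int) : Int :=
  let length := PySem.Str.len (PySem.Int.toStr key_decimal)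
  let limit := p - 1
  if limit ≤ PySem.Int.mod key_decimal 10 then 0
  else
    let lo := pvBsearch key_decimal limit (length - 1).toNat 0 (length - 1)
    PySem.Int.mod key_decimal (10 ^ (lo + 1).toNat)

-- ===== PRECONDITION & SPEC =====
def Spec_suitable_secret_from_key (key_decimal : Int) (p : Int) (out : Int) : Prop := out = suitable_secret_from_key_alt key_decimal p
instance (key_decimal : Int) (p : Int) (out : Int) : Decidable (Spec_suitable_secret_from_key key_decimal p out) := by unfold Spec_suitable_secret_from_key; infer_instance

-- ===== CLAIM (what is proved, stated in full; the proofs are below) =====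
def Claim_equal_suitable_secret_from_key : Prop := ∀ (key_decimal : Int) (p : Int), Dom_suitable_secret_from_key key_decimal p → Spec_suitable_secret_from_key key_decimal p (suitable_secret_from_key key_decimal p)

-- ===== LEMMAS AND PROOFS =====

-- s(i) = key % 10^(i+1), the digit-suffix both programs inspect
def pvS (key : Int) (i : Int) : Int := PySem.Int.mod key (10 ^ (i + 1).toNat)

theorem pvS_nonneg (key i : Int) : 0 ≤ pvS key i :=
  PySem.Int.mod_nonneg key (by positivity)

theorem pvEmod_le (a b : Int) (ha : 0 ≤ a) (hb : 0 < b) : a % b ≤ a := by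
  by_cases h : a < b
  · rw [Int.emod_eq_of_lt ha h]
  · have := Int.emod_lt_of_pos a hb; omega

theorem pvS_mono (key : Int) {i j : Int} (h0 : 0 ≤ i) (hij : i ≤ j) :
    pvS key i ≤ pvS key j := by
  unfold pvS
  rw [PySem.Int.mod_eq_emod_of_pos (by positivity),
      PySem.Int.mod_eq_emod_of_pos (by positivity)]
  have hdvd : (10:Int) ^ (i + 1).toNat ∣ 10 ^ (j + 1).toNat :=
    pow_dvd_pow 10 (by omega)
  calc key % 10 ^ (i + 1).toNat
      = key % 10 ^ (j + 1).toNat % 10 ^ (i + 1).toNat := (Int.emod_emod_of_dvd key hdvd).symm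
    _ ≤ key % 10 ^ (j + 1).toNat :=
        pvEmod_le _ _ (Int.emod_nonneg key (by positivity)) (by positivity)

-- what A's accumulator equals after k iterations
def pvW (key limit : Int) : Nat → Int
  | 0 => 0
  | k + 1 => if pvS key k < limit then pvS key k else pvW key limit k

theorem pvW_le (key limit : Int) : ∀ k : Nat, pvW key limit k ≤ pvS key k
  | 0 => pvS_nonneg key 0
  | k + 1 => by
    unfold pvW
    have hm : pvS key k ≤ pvS key (k + 1 : Nat) := by
      have := pvS_mono key (i := (k:Int)) (j := ((k:Int)+1)) (by positivity) (by omega)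
      simpa [Int.natCast_succ] using this
    split
    · exact hm
    · exact le_trans (pvW_le key limit k) hm

theorem pvA_fold (key p : Int) : ∀ m : Nat,
    (PySem.List.pyRange 0 (m : Int) 1).foldl
      (fun max_secret i =>
        let current_secret := PySem.Int.mod key (10 ^ (i + 1).toNat)
        if current_secret < p - 1 ∧ current_secret > max_secret then current_secret
        else max_secret) 0 = pvW key (p - 1) m := by
  intro m
  induction m with
  | zero => rw [PySem.List.pyRange_one_eq_nil (by norm_num)]; rfl
  | succ m ih =>
    have hcast : ((m + 1 : Nat) : Int) = (m : Int) + 1 := by push_cast; ring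
    rw [hcast, PySem.List.pyRange_one_succ_right (by positivity), List.foldl_append, ih]
    simp only [List.foldl_cons, List.foldl_nil]
    have hle := pvW_le key (p - 1) m
    have hW : pvW key (p - 1) (m + 1) =
        if pvS key (m : Int) < p - 1 then pvS key (m : Int) else pvW key (p - 1) m := rfl
    show (if pvS key (m : Int) < p - 1 ∧ pvS key (m : Int) > pvW key (p - 1) m
          then pvS key (m : Int) else pvW key (p - 1) m) = pvW key (p - 1) (m + 1)
    rw [hW]
    split_ifs with h1 h2 <;> omega

theorem pvBsearch_spec (key limit : Int) : ∀ (fuel : Nat) (lo hi : Int),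
    (hi - lo).toNat ≤ fuel → 0 ≤ lo → lo ≤ hi → pvS key lo < limit →
    lo ≤ pvBsearch key limit fuel lo hi ∧ pvBsearch key limit fuel lo hi ≤ hi ∧
      pvS key (pvBsearch key limit fuel lo hi) < limit ∧
      (∀ j : Int, pvBsearch key limit fuel lo hi < j → j ≤ hi → limit ≤ pvS key j) := by
  intro fuel
  induction fuel with
  | zero =>
    intro lo hi hk h0 hlohi hgood
    have : lo = hi := by omega
    subst this
    simp only [pvBsearch]
    exact ⟨le_refl lo, le_refl lo, hgood, by omega⟩
  | succ fuel ih =>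
    intro lo hi hk h0 hlohi hgood
    by_cases h : lo < hi
    · rw [pvBsearch, if_pos h]
      set mid := PySem.Int.floordiv (lo + hi + 1) 2 with hmid
      have hmid' : mid = (lo + hi + 1) / 2 := by
        rw [hmid, PySem.Int.floordiv_eq_ediv_of_pos (by norm_num)]
      have hlt : lo < mid := by omega
      have hle : mid ≤ hi := by omega
      by_cases hc : PySem.Int.mod key (10 ^ (mid + 1).toNat) < limit
      · rw [if_pos hc]
        obtain ⟨a, b, c, d⟩ := ih mid hi (by omega) (by omega) hle hc
        exact ⟨by omega, b, c, d⟩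
      · rw [if_neg hc]
        obtain ⟨a, b, c, d⟩ := ih lo (mid - 1) (by omega) h0 (by omega) hgood
        refine ⟨a, by omega, c, ?_⟩
        intro j hj1 hj2
        by_cases hj3 : j ≤ mid - 1
        · exact d j hj1 hj3
        · have : pvS key mid ≤ pvS key j := pvS_mono key (by omega) (by omega)
          have hc' : limit ≤ pvS key mid := not_lt.mp hc
          omega
    · rw [pvBsearch, if_neg h]
      exact ⟨le_refl lo, by omega, hgood, by omega⟩

theorem pvW_zero_of_bad (key limit : Int) (hbad : limit ≤ pvS key 0) :
    ∀ m : Nat, pvW key limit m = 0 := by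
  intro m
  induction m with
  | zero => rfl
  | succ m ih =>
    have : limit ≤ pvS key m :=
      le_trans hbad (pvS_mono key (by norm_num) (by positivity))
    unfold pvW
    rw [if_neg (by omega)]
    exact ih

theorem pvW_stable (key limit : Int) (r : Nat) : ∀ m : Nat, r < m →
    (∀ j : Nat, r < j → j < m → limit ≤ pvS key j) →
    pvW key limit m = pvW key limit (r + 1) := by
  intro m
  induction m with
  | zero => omega
  | succ m ih =>
    intro hrm hbad
    by_cases he : r = m
    · rw [he]
    · have h1 : r < m := by omega
      have h2 : limit ≤ pvS key m := hbad m h1 (by omega)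
      unfold pvW
      rw [if_neg (by omega)]
      exact ih h1 (fun j hj1 hj2 => hbad j hj1 (by omega))

-- length of Nat.toDigits is positive
theorem pvToDigitsCore_le (b : Nat) : ∀ (f n : Nat) (l : List Char),
    l.length ≤ (Nat.toDigitsCore b f n l).length := by
  intro f
  induction f with
  | zero => intro n l; simp [Nat.toDigitsCore]
  | succ f ih =>
    intro n l
    simp only [Nat.toDigitsCore]
    split
    · simp
    · exact le_trans (by simp) (ih (n / b) (Nat.digitChar (n % b) :: l))

theorem pvToDigits_pos (b n : Nat) : 1 ≤ (Nat.toDigits b n).length := by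
  unfold Nat.toDigits
  simp only [Nat.toDigitsCore]
  split
  · simp
  · exact le_trans (by simp) (pvToDigitsCore_le b n (n / b) [Nat.digitChar (n % b)])

theorem pvLen_pos (k : Int) : 1 ≤ PySem.Str.len (PySem.Int.toStr k) := by
  rw [PySem.Str.len_eq, PySem.Int.toList_toStr]
  unfold PySem.Int.toChars
  split
  · simp
  · have := pvToDigits_pos 10 k.toNat; omega

-- ===== VERDICT (by name: the statement is the Claim_ definition above) =====
theorem suitable_secret_from_key_spec : Claim_equal_suitable_secret_from_key := by
  intro key p _
  unfold Spec_suitable_secret_from_key suitable_secret_from_key suitable_secret_from_key_alt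
  simp only []
  set n := PySem.Str.len (PySem.Int.toStr key) with hn
  have hn1 : 1 ≤ n := pvLen_pos key
  have hncast : ((n.toNat : Nat) : Int) = n := Int.toNat_of_nonneg (by omega)
  have hA : (PySem.List.pyRange 0 n 1).foldl
      (fun max_secret i =>
        let current_secret := PySem.Int.mod key (10 ^ (i + 1).toNat)
        if current_secret < p - 1 ∧ current_secret > max_secret then current_secret
        else max_secret) 0 = pvW key (p - 1) n.toNat := by
    conv_lhs => rw [← hncast]
    exact pvA_fold key p n.toNat
  rw [hA]
  have hS0 : pvS key 0 = PySem.Int.mod key 10 := by unfold pvS; norm_num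
  by_cases hbad : p - 1 ≤ PySem.Int.mod key 10
  · rw [if_pos hbad]
    exact pvW_zero_of_bad key (p - 1) (by rw [hS0]; exact hbad) n.toNat
  · rw [if_neg hbad]
    obtain ⟨h1, h2, h3, h4⟩ := pvBsearch_spec key (p - 1) (n - 1).toNat 0 (n - 1)
      (by omega) (le_refl 0) (by omega) (by rw [hS0]; omega)
    set r := pvBsearch key (p - 1) (n - 1).toNat 0 (n - 1) with hr
    have hrcast : ((r.toNat : Nat) : Int) = r := Int.toNat_of_nonneg h1
    have hst : pvW key (p - 1) n.toNat = pvW key (p - 1) (r.toNat + 1) := by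
      apply pvW_stable key (p - 1) r.toNat n.toNat (by omega)
      intro j hj1 hj2
      exact h4 (j : Int) (by omega) (by omega)
    rw [hst]
    unfold pvW
    rw [if_pos (by rw [hrcast]; exact h3)]
    show pvS key r.toNat = PySem.Int.mod key (10 ^ (r + 1).toNat)
    rw [hrcast]
    rfl
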